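-- pv_equiv track=rewrite | github.com/XingjianMao/Data_Migration | FD_Search/FD_Mutual_Info.py | select_nodes_ThreeEachSubgraph
-- ===== SOURCE A (Python) =====
-- from collections import defaultdict
-- from collections import defaultdict
--
-- def find_subgraphs(edges):
--     graph = defaultdict(list)
--     for u, v in edges:
--         graph[u].append(v)
--         graph[v].append(u)
--
--     visited = set()
--     subgraphs = []
--
--     def dfs(node, current_subgraph):
--         visited.add(node)
--         current_subgraph.append(node)
--         for neighbor in graph[node]:
--             if neighbor not in visited:
--                 dfs(neighbor, current_subgraph)
--
--     for node in graph.keys():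
--         if node not in visited:
--             current_subgraph = []
--             dfs(node, current_subgraph)
--             subgraphs.append(current_subgraph)
--
--     return subgraphs, graph  # Return both subgraphs and the graph
--
-- def select_nodes_ThreeEachSubgraph(edges):
--     subgraphs, graph = find_subgraphs(edges)
--
--     if len(subgraphs) == 1:  # Whole graph
--         node_degrees = {node: len(neighbors) for node, neighbors in graph.items()}
--         sorted_nodes = sorted(node_degrees.keys(), key=lambda x: node_degrees[x], reverse=True)
--
--         selected = []
--         for node in sorted_nodes:
--             if len(selected) == 3:
--                 break
--             if all(other not in graph[node] for other in selected):
--                 selected.append(node)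
--
--         return selected
--
--     else:  # There are subgraphs
--         selected_nodes = []
--         for subgraph in subgraphs:
--             max_degree_node = max(subgraph, key=lambda node: len(graph[node]))
--             selected_nodes.append(max_degree_node)
--
--         return selected_nodes
-- ===== SOURCE B (Python) =====
-- def select_nodes_ThreeEachSubgraph(edges):
--     # Same task, different decomposition: the recursive dfs of the original is
--     # replaced by an explicit-stack iterative DFS (push reversed neighbors,
--     # check visited on pop), which reproduces the recursive preorder exactly.
--     graph = {}
--     for u, v in edges:
--         graph.setdefault(u, []).append(v)
--         graph.setdefault(v, []).append(u)
--
--     visited = set()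
--     subgraphs = []
--     for root in graph:
--         if root in visited:
--             continue
--         component = []
--         stack = [root]
--         while stack:
--             node = stack.pop()
--             if node in visited:
--                 continue
--             visited.add(node)
--             component.append(node)
--             for neighbor in reversed(graph[node]):
--                 stack.append(neighbor)
--         subgraphs.append(component)
--
--     if len(subgraphs) == 1:
--         order = sorted(graph, key=lambda n: -len(graph[n]))
--         selected = []
--         for node in order:
--             if len(selected) == 3:
--                 break
--             if all(other not in graph[node] for other in selected):
--                 selected.append(node)
--         return selected
--
--     return [max(sg, key=lambda n: len(graph[n])) for sg in subgraphs]
-- ===== Notes on version B (the rewrite author's own statement) =====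
-- stated objective: alternative
-- what changed: The recursive dfs is replaced by an explicit-stack iterative DFS (push reversed neighbors, check visited on pop) that reproduces the recursive preorder, and the selection phase is restated: sorting the keys by negated degree instead of building a degree dict and sorting with reverse=True, and a list comprehension instead of the append loop for the per-component maxima.
import Mathlib
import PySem

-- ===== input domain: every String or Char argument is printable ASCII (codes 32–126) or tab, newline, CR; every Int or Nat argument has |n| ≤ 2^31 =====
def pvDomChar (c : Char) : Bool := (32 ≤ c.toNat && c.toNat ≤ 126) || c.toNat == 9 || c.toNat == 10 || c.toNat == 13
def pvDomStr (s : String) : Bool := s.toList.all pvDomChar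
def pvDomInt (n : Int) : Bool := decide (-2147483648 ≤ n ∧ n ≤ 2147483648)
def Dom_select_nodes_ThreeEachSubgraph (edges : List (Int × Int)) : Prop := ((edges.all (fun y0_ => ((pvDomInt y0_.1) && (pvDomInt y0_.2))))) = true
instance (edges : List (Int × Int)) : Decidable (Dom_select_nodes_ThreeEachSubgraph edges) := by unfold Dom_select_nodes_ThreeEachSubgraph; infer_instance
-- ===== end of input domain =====

-- B replaces A's recursive dfs with an explicit-stack iterative DFS (push reversed
-- neighbors, check visited on pop) and restates the selection phase (sort by negated
-- degree instead of a degree dict + reverse sort; map instead of append loop);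
-- objective: alternative (same asymptotic cost, different decomposition).

-- ===== PORT A =====

-- graph = defaultdict(list); for u, v in edges: graph[u].append(v); graph[v].append(u)
def pvBuildGraphA (edges : List (Int × Int)) : PySem.Dict Int (List Int) :=
  edges.foldl
    (fun d p => (d.modify p.1 [] (fun l => l ++ [p.2])).modify p.2 [] (fun l => l ++ [p.1]))
    PySem.Dict.empty

-- def dfs(node, current_subgraph): visited.add(node); current_subgraph.append(node);
--   for neighbor in graph[node]: if neighbor not in visited: dfs(neighbor, current_subgraph)
-- The Nat fuel only guards totality (recursion depth is bounded by the number of keys,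
-- so with the fuel used below the 0-branch is never reached); each step is Python's.
mutual
def pvDfsA (g : PySem.Dict Int (List Int)) : Nat → Int → PySem.Set Int → List Int → PySem.Set Int × List Int
  | 0, _, v, c => (v, c)
  | f + 1, node, v, c => pvDfsAList g f (g.getD node []) (PySem.Set.add v node) (c ++ [node])
  termination_by f _ _ _ => (f, 0)

def pvDfsAList (g : PySem.Dict Int (List Int)) : Nat → List Int → PySem.Set Int → List Int → PySem.Set Int × List Int
  | _, [], v, c => (v, c)
  | f, n :: rest, v, c =>
    if PySem.Set.contains v n then pvDfsAList g f rest v c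
    else
      let p := pvDfsA g f n v c
      pvDfsAList g f rest p.1 p.2
  termination_by f ms _ _ => (f, ms.length + 1)
end

-- find_subgraphs: for node in graph.keys(): if node not in visited: dfs(node, []); append
def pvFindSubgraphsA (edges : List (Int × Int)) : List (List Int) × PySem.Dict Int (List Int) :=
  let g := pvBuildGraphA edges
  let st := g.keys.foldl
    (fun (st : PySem.Set Int × List (List Int)) node =>
      if PySem.Set.contains st.1 node then st
      else
        let p := pvDfsA g (g.keys.length + 1) node st.1 []
        (p.1, st.2 ++ [p.2]))
    (PySem.Set.empty, [])
  (st.2, g)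

-- for node in sorted_nodes: if len(selected)==3: break; if all(other not in graph[node] ...): append
def pvSelLoopA (g : PySem.Dict Int (List Int)) : List Int → List Int → List Int
  | [], sel => sel
  | n :: rest, sel =>
    if sel.length == 3 then sel
    else if sel.all (fun other => !((g.getD n []).contains other)) then pvSelLoopA g rest (sel ++ [n])
    else pvSelLoopA g rest sel

def select_nodes_ThreeEachSubgraph (edges : List (Int × Int)) : List Int :=
  let fs := pvFindSubgraphsA edges
  let subgraphs := fs.1
  let graph := fs.2
  if subgraphs.length == 1 then
    -- node_degrees = {node: len(neighbors) for node, neighbors in graph.items()}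
    let node_degrees : PySem.Dict Int Int :=
      graph.items.foldl (fun d p => d.insert p.1 (p.2.length : Int)) PySem.Dict.empty
    -- sorted(node_degrees.keys(), key=lambda x: node_degrees[x], reverse=True)
    -- (every sorted element is a key of node_degrees, so the getD default is never read)
    let sorted_nodes := PySem.List.sorted node_degrees.keys (fun x => node_degrees.getD x 0) true
    pvSelLoopA graph sorted_nodes []
  else
    -- for subgraph in subgraphs: selected_nodes.append(max(subgraph, key=...))
    -- (components are nonempty, so max? is never none and the getD default is never read)
    subgraphs.foldl
      (fun acc sg => acc ++ [(PySem.List.max? sg (fun n => ((graph.getD n []).length : Int))).getD 0]) []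

-- ===== PORT B =====

-- graph = {}; for u, v in edges: graph.setdefault(u, []).append(v); graph.setdefault(v, []).append(u)
-- (setdefault-then-append is exactly Dict.modify with default [])
def pvBuildGraphB (edges : List (Int × Int)) : PySem.Dict Int (List Int) :=
  edges.foldl
    (fun d p => (d.modify p.1 [] (fun l => l ++ [p.2])).modify p.2 [] (fun l => l ++ [p.1]))
    PySem.Dict.empty

-- while stack: node = stack.pop(); if node in visited: continue; visited.add(node);
--   component.append(node); for neighbor in reversed(graph[node]): stack.append(neighbor)
-- The stack is kept TOP-FIRST here (mirror image of the Python list whose top is its end),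
-- so Python's push-all-of-reversed(graph[node]) is prepending graph[node] as it is.
-- The Nat fuel only guards totality: it decreases once per newly visited node, and the
-- fuel used below exceeds the number of keys, so the 0-branch is never reached.
def pvIterDfsB (g : PySem.Dict Int (List Int)) : Nat → PySem.Set Int → List Int → List Int → PySem.Set Int × List Int
  | _, v, [], c => (v, c)
  | f, v, node :: stack, c =>
    if PySem.Set.contains v node then pvIterDfsB g f v stack c
    else
      match f with
      | 0 => (v, c)
      | f + 1 => pvIterDfsB g f (PySem.Set.add v node) (g.getD node [] ++ stack) (c ++ [node])
  termination_by f v st c => (f, st.length)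

-- for node in order: if len(selected)==3: break; if all(other not in graph[node] ...): append
def pvSelLoopB (g : PySem.Dict Int (List Int)) : List Int → List Int → List Int
  | [], sel => sel
  | n :: rest, sel =>
    if sel.length == 3 then sel
    else if sel.all (fun other => !((g.getD n []).contains other)) then pvSelLoopB g rest (sel ++ [n])
    else pvSelLoopB g rest sel

def select_nodes_ThreeEachSubgraph_alt (edges : List (Int × Int)) : List Int :=
  let g := pvBuildGraphB edges
  let st := g.keys.foldl
    (fun (st : PySem.Set Int × List (List Int)) root =>
      if PySem.Set.contains st.1 root then st
      else
        let p := pvIterDfsB g (g.keys.length + 1) st.1 [root] []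
        (p.1, st.2 ++ [p.2]))
    (PySem.Set.empty, [])
  let subgraphs := st.2
  if subgraphs.length == 1 then
    -- order = sorted(graph, key=lambda n: -len(graph[n]))
    let order := PySem.List.sorted g.keys (fun n => -((g.getD n []).length : Int)) false
    pvSelLoopB g order []
  else
    -- [max(sg, key=lambda n: len(graph[n])) for sg in subgraphs] (components nonempty)
    subgraphs.map (fun sg => (PySem.List.max? sg (fun n => ((g.getD n []).length : Int))).getD 0)

-- ===== PRECONDITION & SPEC =====
def Spec_select_nodes_ThreeEachSubgraph (edges : List (Int × Int)) (out : List Int) : Prop := out = select_nodes_ThreeEachSubgraph_alt edges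
instance (edges : List (Int × Int)) (out : List Int) : Decidable (Spec_select_nodes_ThreeEachSubgraph edges out) := by unfold Spec_select_nodes_ThreeEachSubgraph; infer_instance

-- ===== CLAIM (what is proved, stated in full; the proofs are below) =====
def Claim_equal_select_nodes_ThreeEachSubgraph : Prop := ∀ (edges : List (Int × Int)), Dom_select_nodes_ThreeEachSubgraph edges → Spec_select_nodes_ThreeEachSubgraph edges (select_nodes_ThreeEachSubgraph edges)

-- ===== LEMMAS AND PROOFS =====

-- ---- basic facts about the shared graph/visited-set machinery ----

theorem pv_contains_add (v : PySem.Set Int) (x y : Int) :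
    PySem.Set.contains (PySem.Set.add v x) y = (PySem.Set.contains v y || (y == x)) := by
  simp [PySem.Set.contains, PySem.Set.add]
  by_cases h : x ∈ v <;> by_cases h2 : y = x <;> simp [h, h2]

-- the closure property of the built graph: every recorded neighbor is itself a key
def pvAdjClosed (g : PySem.Dict Int (List Int)) : Prop :=
  ∀ n m : Int, m ∈ g.getD n [] → m ∈ g.keys

-- both directed copies of the edge list, in insertion order
def pvPairs (edges : List (Int × Int)) : List (Int × Int) :=
  edges.flatMap (fun e => [(e.1, e.2), (e.2, e.1)])

theorem pv_build_eq_pairs (edges : List (Int × Int)) :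
    pvBuildGraphA edges
      = (pvPairs edges).foldl (fun d p => d.modify p.1 [] (fun l => l ++ [p.2])) PySem.Dict.empty := by
  suffices h : ∀ (es : List (Int × Int)) (d : PySem.Dict Int (List Int)),
      es.foldl (fun d p => (d.modify p.1 [] (fun l => l ++ [p.2])).modify p.2 [] (fun l => l ++ [p.1])) d
        = (pvPairs es).foldl (fun d p => d.modify p.1 [] (fun l => l ++ [p.2])) d from h edges _
  intro es
  induction es with
  | nil => intro d; simp [pvPairs]
  | cons e rest ih =>
      intro d
      simp only [pvPairs, List.flatMap_cons, List.foldl_append, List.foldl_cons, List.foldl_nil] at *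
      simp [ih]

theorem pv_keys_build (edges : List (Int × Int)) :
    (pvBuildGraphA edges).keys = PySem.Set.ofList ((pvPairs edges).map Prod.fst) := by
  rw [pv_build_eq_pairs, PySem.Dict.keys_foldl_modify_key, PySem.Dict.keys_empty]
  exact PySem.Set.update_empty _

theorem pv_nodup_keys_build (edges : List (Int × Int)) :
    (pvBuildGraphA edges).keys.Nodup := by
  rw [pv_build_eq_pairs]
  exact PySem.Dict.nodup_keys_foldl_modify_key _ _ _ _ _ PySem.Dict.nodup_keys_empty

theorem pv_getD_build (edges : List (Int × Int)) (c : Int) :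
    (pvBuildGraphA edges).getD c []
      = (((pvPairs edges).filter (fun p => p.1 == c)).map (·.2)) := by
  rw [pv_build_eq_pairs, PySem.Dict.getD_foldl_modify_append]
  simp [PySem.Dict.getD_empty]

theorem pv_pairs_symm (edges : List (Int × Int)) (a b : Int) :
    (a, b) ∈ pvPairs edges → (b, a) ∈ pvPairs edges := by
  simp only [pvPairs, List.mem_flatMap, List.mem_cons, List.not_mem_nil, or_false]
  rintro ⟨e, he, hm⟩
  refine ⟨e, he, ?_⟩
  rcases hm with h | h <;> rw [Prod.ext_iff] at h ⊢ <;> simp at h ⊢ <;> omega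

theorem pv_adjClosed_build (edges : List (Int × Int)) : pvAdjClosed (pvBuildGraphA edges) := by
  intro n m hm
  rw [pv_getD_build] at hm
  rw [pv_keys_build, PySem.Set.mem_ofList]
  simp only [List.mem_map, List.mem_filter] at hm
  obtain ⟨p, ⟨hp, hc⟩, rfl⟩ := hm
  have : (p.2, p.1) ∈ pvPairs edges := pv_pairs_symm edges p.1 p.2 (by simpa using hp)
  exact List.mem_map.mpr ⟨(p.2, p.1), this, rfl⟩

-- ---- the count of still-unvisited keys: the common fuel measure of both traversals ----

def pvUnvis (g : PySem.Dict Int (List Int)) (v : PySem.Set Int) : Nat :=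
  (g.keys.filter (fun k => !(PySem.Set.contains v k))).length

theorem pv_unvis_le (g : PySem.Dict Int (List Int)) (v : PySem.Set Int) :
    pvUnvis g v ≤ g.keys.length :=
  List.length_filter_le _ _

theorem pv_unvis_pos (g : PySem.Dict Int (List Int)) {v : PySem.Set Int} {m : Int}
    (hm : m ∈ g.keys) (h : PySem.Set.contains v m = false) : 0 < pvUnvis g v :=
  List.length_pos_of_mem (List.mem_filter.mpr ⟨hm, by simp [PySem.Set.contains] at h ⊢; exact h⟩)

theorem pv_filter_length_succ {p : Int → Bool} {m : Int} :
    ∀ l : List Int, l.Nodup → m ∈ l → p m = true →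
      (l.filter (fun k => p k && !(k == m))).length + 1 = (l.filter p).length := by
  intro l
  induction l with
  | nil => simp
  | cons a l ih =>
    intro hnd hm hp
    rw [List.nodup_cons] at hnd
    rcases List.mem_cons.mp hm with rfl | hml
    · have : ∀ k ∈ l, (p k && !(k == m)) = p k := by
        intro k hk
        have : (k == m) = false := by simp; rintro rfl; exact hnd.1 hk
        simp [this]
      simp [List.filter_cons, hp, List.filter_congr this]
    · have hne : (a == m) = false := by simp; rintro rfl; exact hnd.1 hml
      by_cases hpa : p a = true
      · simp [List.filter_cons, hpa, hne, ih hnd.2 hml hp]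
      · simp at hpa
        simp [List.filter_cons, hpa, hne, ih hnd.2 hml hp]

theorem pv_unvis_add (g : PySem.Dict Int (List Int)) {v : PySem.Set Int} {m : Int}
    (hnd : g.keys.Nodup) (hm : m ∈ g.keys) (h : PySem.Set.contains v m = false) :
    pvUnvis g (PySem.Set.add v m) + 1 = pvUnvis g v := by
  unfold pvUnvis
  have hcongr : ∀ k ∈ g.keys,
      (!(PySem.Set.contains (PySem.Set.add v m) k)) = ((!(PySem.Set.contains v k)) && !(k == m)) := by
    intro k _
    rw [pv_contains_add]
    cases hvk : PySem.Set.contains v k <;> cases hkm : (k == m) <;> simp [hvk, hkm]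
  rw [List.filter_congr hcongr]
  exact pv_filter_length_succ g.keys hnd hm (by simp [PySem.Set.contains] at h ⊢; exact h)

theorem pv_unvis_antitone (g : PySem.Dict Int (List Int)) {v w : PySem.Set Int}
    (h : ∀ x, PySem.Set.contains v x = true → PySem.Set.contains w x = true) :
    pvUnvis g w ≤ pvUnvis g v := by
  unfold pvUnvis
  rw [← List.countP_eq_length_filter, ← List.countP_eq_length_filter]
  apply List.countP_mono_left
  intro a _ ha
  cases hv : PySem.Set.contains v a
  · simp
  · rw [h a hv] at ha
    exact absurd ha (by simp)

-- ---- the visited set only grows along A's dfs ----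

theorem pv_dfsAList_mono_aux (g : PySem.Dict Int (List Int)) (f : Nat)
    (hA : ∀ n v c x, PySem.Set.contains v x = true → PySem.Set.contains (pvDfsA g f n v c).1 x = true) :
    ∀ ms v c x, PySem.Set.contains v x = true → PySem.Set.contains (pvDfsAList g f ms v c).1 x = true := by
  intro ms
  induction ms with
  | nil => intro v c x h; simpa [pvDfsAList] using h
  | cons n rest ih =>
    intro v c x h
    simp only [pvDfsAList]
    cases hv : PySem.Set.contains v n
    · rw [if_neg (by simp)]
      exact ih _ _ x (hA n v c x h)
    · rw [if_pos rfl]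
      exact ih v c x h

theorem pv_dfsA_mono (g : PySem.Dict Int (List Int)) :
    ∀ f n v c x, PySem.Set.contains v x = true → PySem.Set.contains (pvDfsA g f n v c).1 x = true := by
  intro f
  induction f with
  | zero => intro n v c x h; simpa [pvDfsA] using h
  | succ f ih =>
    intro n v c x h
    simp only [pvDfsA]
    exact pv_dfsAList_mono_aux g f ih _ _ _ x (by rw [pv_contains_add, h]; rfl)

theorem pv_dfsAList_mono (g : PySem.Dict Int (List Int)) (f : Nat) :
    ∀ ms v c x, PySem.Set.contains v x = true → PySem.Set.contains (pvDfsAList g f ms v c).1 x = true :=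
  pv_dfsAList_mono_aux g f (pv_dfsA_mono g f)

-- step equations of the iterative loop (in the form the proofs use)
theorem pv_iter_nil (g : PySem.Dict Int (List Int)) (f : Nat) (v : PySem.Set Int) (c : List Int) :
    pvIterDfsB g f v [] c = (v, c) := by
  unfold pvIterDfsB
  rfl

theorem pv_iter_skip (g : PySem.Dict Int (List Int)) (f : Nat) (v : PySem.Set Int) (c st : List Int) (m : Int)
    (hv : PySem.Set.contains v m = true) :
    pvIterDfsB g f v (m :: st) c = pvIterDfsB g f v st c := by
  conv_lhs => rw [pvIterDfsB.eq_def]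
  simp only [hv, if_true]

theorem pv_iter_visit (g : PySem.Dict Int (List Int)) (f : Nat) (v : PySem.Set Int) (c st : List Int) (m : Int)
    (hv : PySem.Set.contains v m = false) :
    pvIterDfsB g (f + 1) v (m :: st) c = pvIterDfsB g f (PySem.Set.add v m) (g.getD m [] ++ st) (c ++ [m]) := by
  conv_lhs => rw [pvIterDfsB.eq_def]
  simp only [hv, Bool.false_eq_true, if_false]

-- ---- the key lemma: the iterative DFS consumes its stack exactly as A's recursive
-- ---- dfs processes the same list of nodes (same visited set, same visit order) ----

theorem pv_main (g : PySem.Dict Int (List Int)) (hAC : pvAdjClosed g) (hnd : g.keys.Nodup) :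
    ∀ N : Nat, ∀ ms : List Int, (∀ m ∈ ms, m ∈ g.keys) →
      ∀ (v : PySem.Set Int) (c rest : List Int) (k fA : Nat),
        pvUnvis g v ≤ N → pvUnvis g v < fA →
        pvIterDfsB g (pvUnvis g v + k) v (ms ++ rest) c
          = pvIterDfsB g (pvUnvis g (pvDfsAList g fA ms v c).1 + k)
              (pvDfsAList g fA ms v c).1 rest (pvDfsAList g fA ms v c).2 := by
  intro N
  induction N with
  | zero =>
    intro ms
    induction ms with
    | nil => intro _ v c rest k fA _ _; simp [pvDfsAList]
    | cons m ms' ihms =>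
      intro hmem v c rest k fA hle hfa
      have hm : m ∈ g.keys := hmem m (by simp)
      have hv : PySem.Set.contains v m = true := by
        cases hc : PySem.Set.contains v m
        · exact absurd (pv_unvis_pos g hm hc) (by omega)
        · rfl
      rw [List.cons_append]
      have eL : pvIterDfsB g (pvUnvis g v + k) v (m :: (ms' ++ rest)) c
          = pvIterDfsB g (pvUnvis g v + k) v (ms' ++ rest) c := pv_iter_skip g _ v c _ m hv
      have eR : pvDfsAList g fA (m :: ms') v c = pvDfsAList g fA ms' v c := by
        simp only [pvDfsAList]
        rw [if_pos hv]
      rw [eL, eR]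
      exact ihms (fun x hx => hmem x (by simp [hx])) v c rest k fA hle hfa
  | succ N ihN =>
    intro ms
    induction ms with
    | nil => intro _ v c rest k fA _ _; simp [pvDfsAList]
    | cons m ms' ihms =>
      intro hmem v c rest k fA hle hfa
      have hm : m ∈ g.keys := hmem m (by simp)
      cases hv : PySem.Set.contains v m
      · -- m not yet visited: both sides visit it and then work through its neighbors
        have hpos : 0 < pvUnvis g v := pv_unvis_pos g hm hv
        have hadd : pvUnvis g (PySem.Set.add v m) + 1 = pvUnvis g v := pv_unvis_add g hnd hm hv
        obtain ⟨fA', rfl⟩ : ∃ fA', fA = fA' + 1 := ⟨fA - 1, by omega⟩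
        have e1 : pvIterDfsB g (pvUnvis g v + k) v ((m :: ms') ++ rest) c
            = pvIterDfsB g (pvUnvis g (PySem.Set.add v m) + k) (PySem.Set.add v m)
                (g.getD m [] ++ (ms' ++ rest)) (c ++ [m]) := by
          rw [List.cons_append]
          rw [show pvUnvis g v + k = (pvUnvis g (PySem.Set.add v m) + k) + 1 from by omega]
          exact pv_iter_visit g _ v c _ m hv
        have e2 := ihN (g.getD m []) (fun x hx => hAC m x hx) (PySem.Set.add v m) (c ++ [m])
            (ms' ++ rest) k fA' (by omega) (by omega)
        have hmono : ∀ x, PySem.Set.contains (PySem.Set.add v m) x = true →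
            PySem.Set.contains (pvDfsAList g fA' (g.getD m []) (PySem.Set.add v m) (c ++ [m])).1 x = true :=
          fun x hx => pv_dfsAList_mono g fA' _ _ _ x hx
        have hle2 : pvUnvis g (pvDfsAList g fA' (g.getD m []) (PySem.Set.add v m) (c ++ [m])).1
            ≤ pvUnvis g (PySem.Set.add v m) := pv_unvis_antitone g hmono
        have e3 := ihN ms' (fun x hx => hmem x (by simp [hx]))
            (pvDfsAList g fA' (g.getD m []) (PySem.Set.add v m) (c ++ [m])).1
            (pvDfsAList g fA' (g.getD m []) (PySem.Set.add v m) (c ++ [m])).2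
            rest k (fA' + 1) (by omega) (by omega)
        have hR : pvDfsAList g (fA' + 1) (m :: ms') v c
            = pvDfsAList g (fA' + 1) ms'
                (pvDfsAList g fA' (g.getD m []) (PySem.Set.add v m) (c ++ [m])).1
                (pvDfsAList g fA' (g.getD m []) (PySem.Set.add v m) (c ++ [m])).2 := by
          simp only [pvDfsAList]
          rw [if_neg (by simp only [hv]; exact Bool.false_ne_true)]
          simp only [pvDfsA]
        rw [e1, e2, e3, hR]
      · -- m already visited: both sides skip it
        have eL : pvIterDfsB g (pvUnvis g v + k) v ((m :: ms') ++ rest) c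
            = pvIterDfsB g (pvUnvis g v + k) v (ms' ++ rest) c := by
          rw [List.cons_append]
          exact pv_iter_skip g _ v c _ m hv
        have eR : pvDfsAList g fA (m :: ms') v c = pvDfsAList g fA ms' v c := by
          simp only [pvDfsAList]
          rw [if_pos hv]
        rw [eL, eR]
        exact ihms (fun x hx => hmem x (by simp [hx])) v c rest k fA hle hfa

-- ---- per-root equality and equality of the component lists ----

theorem pv_root_eq (g : PySem.Dict Int (List Int)) (hAC : pvAdjClosed g) (hnd : g.keys.Nodup)
    (v : PySem.Set Int) (n : Int) (hn : n ∈ g.keys) (hc : PySem.Set.contains v n = false) :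
    pvIterDfsB g (g.keys.length + 1) v [n] [] = pvDfsA g (g.keys.length + 1) n v [] := by
  have hu : pvUnvis g v ≤ g.keys.length := pv_unvis_le g v
  have hmain := pv_main g hAC hnd (pvUnvis g v) [n] (by simp [hn]) v [] []
      (g.keys.length + 1 - pvUnvis g v) (g.keys.length + 1) le_rfl (by omega)
  rw [show pvUnvis g v + (g.keys.length + 1 - pvUnvis g v) = g.keys.length + 1 from by omega] at hmain
  simp only [List.singleton_append, List.append_nil] at hmain
  have hList : pvDfsAList g (g.keys.length + 1) [n] v [] = pvDfsA g (g.keys.length + 1) n v [] := by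
    simp only [pvDfsAList]
    rw [if_neg (by simp only [hc]; exact Bool.false_ne_true)]
  rw [hList] at hmain
  rw [hmain, pv_iter_nil]

theorem pv_fold_eq (g : PySem.Dict Int (List Int)) (hAC : pvAdjClosed g) (hnd : g.keys.Nodup) :
    g.keys.foldl
      (fun (st : PySem.Set Int × List (List Int)) node =>
        if PySem.Set.contains st.1 node then st
        else
          let p := pvDfsA g (g.keys.length + 1) node st.1 []
          (p.1, st.2 ++ [p.2]))
      (PySem.Set.empty, [])
    = g.keys.foldl
      (fun (st : PySem.Set Int × List (List Int)) root =>
        if PySem.Set.contains st.1 root then st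
        else
          let p := pvIterDfsB g (g.keys.length + 1) st.1 [root] []
          (p.1, st.2 ++ [p.2]))
      (PySem.Set.empty, []) := by
  apply PySem.List.foldl_congr_mem
  intro st n hn
  cases hc : PySem.Set.contains st.1 n
  · simp only [hc, Bool.false_eq_true, if_false]
    rw [pv_root_eq g hAC hnd st.1 n hn hc]
  · simp only [hc, if_true]

-- ---- the selection phase: degree dict + reverse sort vs sort by negated degree ----

def pvDegD (g : PySem.Dict Int (List Int)) : PySem.Dict Int Int :=
  g.items.foldl (fun d p => d.insert p.1 (p.2.length : Int)) PySem.Dict.empty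

theorem pv_keys_degD (g : PySem.Dict Int (List Int)) (hnd : g.keys.Nodup) :
    (pvDegD g).keys = g.keys := by
  unfold pvDegD
  rw [PySem.Dict.keys_foldl_insert_key, PySem.Dict.keys_empty]
  have h1 : PySem.Set.update [] (g.items.map fun p => p.1) = PySem.Set.ofList (g.items.map fun p => p.1) :=
    PySem.Set.update_empty _
  rw [h1]
  simp only [PySem.Dict.keys] at hnd ⊢
  exact PySem.Set.ofList_eq_self_of_nodup _ hnd

theorem pv_nodup_keys_degD (g : PySem.Dict Int (List Int)) : (pvDegD g).keys.Nodup := by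
  unfold pvDegD
  exact PySem.Dict.nodup_keys_foldl_insert_key _ _ _ _ PySem.Dict.nodup_keys_empty

theorem pv_items_degD (g : PySem.Dict Int (List Int)) (hnd : g.keys.Nodup) :
    (pvDegD g).items = g.items.map (fun p => (p.1, (p.2.length : Int))) := by
  unfold pvDegD
  rw [PySem.Dict.items_foldl_insert_fresh _ _ _ _ (fun a _ => PySem.Dict.contains_empty _)
    (by simpa only [PySem.Dict.keys] using hnd)]
  simp [PySem.Dict.empty]

theorem pv_deg_getD (g : PySem.Dict Int (List Int)) (hnd : g.keys.Nodup) (x : Int) :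
    (pvDegD g).getD x 0 = ((g.getD x []).length : Int) := by
  by_cases hx : x ∈ g.keys
  · obtain ⟨p, hp, hpx⟩ := List.mem_map.mp (by simpa only [PySem.Dict.keys] using hx)
    have hpair : (x, p.2) = p := by rw [← hpx]
    have hg : g.get? x = some p.2 := PySem.Dict.get?_of_mem_items g (by rw [hpair]; exact hp) hnd
    have hgd : g.getD x [] = p.2 := PySem.Dict.getD_of_get?_eq_some g [] hg
    have hmem : (x, (p.2.length : Int)) ∈ (pvDegD g).items := by
      rw [pv_items_degD g hnd]
      exact List.mem_map.mpr ⟨p, hp, by rw [← hpx]⟩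
    rw [PySem.Dict.getD_of_mem_items _ hmem (pv_nodup_keys_degD g), hgd]
  · have hc : g.contains x = false := by
      cases h : g.contains x
      · rfl
      · exact absurd ((PySem.Dict.contains_iff_mem_keys g x).mp h) hx
    have hcD : (pvDegD g).contains x = false := by
      cases h : (pvDegD g).contains x
      · rfl
      · have := (PySem.Dict.contains_iff_mem_keys _ x).mp h
        rw [pv_keys_degD g hnd] at this
        exact absurd this hx
    rw [PySem.Dict.getD_of_not_contains _ 0 hcD, PySem.Dict.getD_of_not_contains _ [] hc]
    rfl

theorem pv_sorted_neg (l : List Int) (key : Int → Int) :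
    PySem.List.sorted l key true = PySem.List.sorted l (fun x => -(key x)) false := by
  rw [PySem.List.sorted_rev_eq_foldl_insertBy, PySem.List.sorted_eq_foldl_insertBy]
  simp only [neg_lt_neg_iff]

theorem pv_selLoop_eq (g : PySem.Dict Int (List Int)) :
    ∀ (ms sel : List Int), pvSelLoopB g ms sel = pvSelLoopA g ms sel := by
  intro ms
  induction ms with
  | nil => intro sel; simp [pvSelLoopA, pvSelLoopB]
  | cons n rest ih =>
    intro sel
    simp only [pvSelLoopA, pvSelLoopB]
    split_ifs <;> simp [ih]

-- ===== VERDICT (by name: the statement is the Claim_ definition above) =====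
theorem select_nodes_ThreeEachSubgraph_spec : Claim_equal_select_nodes_ThreeEachSubgraph := by
  unfold Claim_equal_select_nodes_ThreeEachSubgraph
  intro edges _
  unfold Spec_select_nodes_ThreeEachSubgraph
  simp only [select_nodes_ThreeEachSubgraph, select_nodes_ThreeEachSubgraph_alt, pvFindSubgraphsA,
    show pvBuildGraphB = pvBuildGraphA from rfl]
  have hAC := pv_adjClosed_build edges
  have hnd := pv_nodup_keys_build edges
  rw [← pv_fold_eq (pvBuildGraphA edges) hAC hnd]
  cases hlen : ((pvBuildGraphA edges).keys.foldl
      (fun (st : PySem.Set Int × List (List Int)) node =>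
        if PySem.Set.contains st.1 node then st
        else
          let p := pvDfsA (pvBuildGraphA edges) ((pvBuildGraphA edges).keys.length + 1) node st.1 []
          (p.1, st.2 ++ [p.2]))
      (PySem.Set.empty, [])).2.length == 1
  · -- several components: append loop vs map
    simp only [hlen, Bool.false_eq_true, if_false]
    rw [PySem.List.foldl_append_singleton_eq_map]
    simp
  · -- single component: degree sort + greedy selection
    simp only [hlen, if_true]
    rw [pv_selLoop_eq]
    congr 1
    have h2 : (fun x => ((pvBuildGraphA edges).items.foldl
          (fun d p => d.insert p.1 (p.2.length : Int)) PySem.Dict.empty).getD x 0)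
        = (fun n => (((pvBuildGraphA edges).getD n []).length : Int)) :=
      funext (pv_deg_getD (pvBuildGraphA edges) hnd)
    calc PySem.List.sorted ((pvBuildGraphA edges).items.foldl
            (fun d p => d.insert p.1 (p.2.length : Int)) PySem.Dict.empty).keys
            (fun x => ((pvBuildGraphA edges).items.foldl
              (fun d p => d.insert p.1 (p.2.length : Int)) PySem.Dict.empty).getD x 0) true
        = PySem.List.sorted (pvBuildGraphA edges).keys
            (fun n => (((pvBuildGraphA edges).getD n []).length : Int)) true := by
          rw [show ((pvBuildGraphA edges).items.foldl
              (fun d p => d.insert p.1 (p.2.length : Int)) PySem.Dict.empty).keys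
            = (pvBuildGraphA edges).keys from pv_keys_degD _ hnd, h2]
      _ = _ := pv_sorted_neg _ _
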